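-- pv_equiv track=rewrite | github.com/xuhui1/DailyProgram | program.py | equal_size_bin
-- ===== SOURCE A (Python) =====
-- def equal_size_bin(m,n):
-- 	quotient = int(m / n)
-- 	remainder = m % n
-- 	if remainder > 0:
-- 		bin_list = [quotient] * (n - remainder) + [quotient + 1] * remainder
-- 	else:
-- 		bin_list = [quotient] * n
--
-- 	for i in range(1, len(bin_list)):
-- 		bin_list[i] = bin_list[i] + bin_list[i - 1]
-- 	return bin_list
-- ===== SOURCE B (Python) =====
-- def equal_size_bin(m, n):
-- 	quotient = int(m / n)
-- 	remainder = m % n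
-- 	return [quotient * (i + 1) + max(0, (i + 1) - (n - remainder)) for i in range(n)]
-- ===== Notes on version B (the rewrite author's own statement) =====
-- stated objective: simpler
-- what changed: B replaces building the bin-size list and the in-place cumulative-sum loop by a single comprehension computing each prefix sum directly with the closed form quotient*(i+1) + max(0, (i+1)-(n-remainder)).
import Mathlib
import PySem

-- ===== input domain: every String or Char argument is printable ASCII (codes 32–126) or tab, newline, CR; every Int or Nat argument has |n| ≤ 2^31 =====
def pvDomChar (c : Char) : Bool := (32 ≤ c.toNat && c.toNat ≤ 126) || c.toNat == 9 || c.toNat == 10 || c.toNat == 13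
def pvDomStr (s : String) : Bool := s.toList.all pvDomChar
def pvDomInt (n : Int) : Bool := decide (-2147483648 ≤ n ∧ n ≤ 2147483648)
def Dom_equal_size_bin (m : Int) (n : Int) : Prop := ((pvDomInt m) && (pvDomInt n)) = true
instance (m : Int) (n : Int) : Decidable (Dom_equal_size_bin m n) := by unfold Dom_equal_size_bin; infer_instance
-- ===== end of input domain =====

-- B computes each cumulative value by a closed-form comprehension instead of A's
-- bin-size list plus in-place accumulation loop (objective: simpler).

-- ===== PORT A =====
-- 'for i in range(1, len(...)): bin_list[i] += bin_list[i-1]' : in-place cumulative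
-- sum; ported as structural recursion carrying the previous (already-updated) cell.
def cumLoopA (prev : Int) : List Int → List Int
  | [] => []
  | x :: xs => (prev + x) :: cumLoopA (prev + x) xs

-- 'int(m / n)' is exact truncating division on |m|,|n| ≤ 2^31 (float error < 1/|n|),
-- ported as Int.tdiv; 'm % n' is Python's floor mod (PySem.Int.mod).
-- '[q] * k' with k possibly negative: List.replicate k.toNat q (clamps to empty, as Python).
def equal_size_bin (m : Int) (n : Int) : List Int :=
  let quotient := m.tdiv n
  let remainder := PySem.Int.mod m n
  let bin_list :=
    if remainder > 0 then
      List.replicate (n - remainder).toNat quotient ++ List.replicate remainder.toNat (quotient + 1)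
    else
      List.replicate n.toNat quotient
  match bin_list with
  | [] => []
  | x :: xs => x :: cumLoopA x xs

-- ===== PORT B =====
def equal_size_bin_alt (m : Int) (n : Int) : List Int :=
  let quotient := m.tdiv n
  let remainder := PySem.Int.mod m n
  (PySem.List.pyRange 0 n 1).map (fun i => quotient * (i + 1) + max 0 ((i + 1) - (n - remainder)))

-- ===== PRECONDITION & SPEC =====
-- A raises ZeroDivisionError iff n = 0; that is all Pre_ excludes.
def Pre_equal_size_bin (m : Int) (n : Int) : Prop := n ≠ 0
instance (m : Int) (n : Int) : Decidable (Pre_equal_size_bin m n) := by unfold Pre_equal_size_bin; infer_instance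
def pvWitness_equal_size_bin : Int × Int := (7, 3)

def Spec_equal_size_bin (m : Int) (n : Int) (out : List Int) : Prop := out = equal_size_bin_alt m n
instance (m : Int) (n : Int) (out : List Int) : Decidable (Spec_equal_size_bin m n out) := by unfold Spec_equal_size_bin; infer_instance

-- ===== CLAIM (what is proved, stated in full; the proofs are below) =====
def Claim_equal_equal_size_bin : Prop := ∀ (m : Int) (n : Int), Dom_equal_size_bin m n → Pre_equal_size_bin m n → Spec_equal_size_bin m n (equal_size_bin m n)

-- ===== LEMMAS AND PROOFS =====

-- cumLoopA produces prev + (prefix sums): characterisation used for both branches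
lemma cumLoopA_eq (prev : Int) (L : List Int) :
    cumLoopA prev L = (List.range L.length).map (fun i => prev + (L.take (i + 1)).sum) := by
  induction L generalizing prev with
  | nil => simp [cumLoopA]
  | cons x xs ih =>
    simp only [cumLoopA, List.length_cons, List.range_succ_eq_map, List.map_cons, List.map_map,
      List.cons.injEq]
    constructor
    · simp
    · rw [ih]
      apply List.map_congr_left
      intro i _
      simp [List.take_succ_cons, List.sum_cons]
      ring

-- sum of the first k elements of the A-branch bin list, k ≤ a + b
lemma take_sum_bins (q : Int) (a b k : Nat) (hk : k ≤ a + b) :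
    ((List.replicate a q ++ List.replicate b (q + 1)).take k).sum
      = q * k + max 0 ((k : Int) - a) := by
  by_cases h : k ≤ a
  · rw [List.take_append_of_le_length (by simpa using h), List.take_replicate]
    have : min k a = k := by omega
    rw [this, List.sum_replicate]
    have : (max 0 ((k : Int) - a)) = 0 := by omega
    rw [this]
    push_cast
    ring
  -- k > a
  · obtain ⟨c, rfl⟩ : ∃ c, k = a + c := ⟨k - a, by omega⟩
    rw [List.take_append, List.take_replicate, List.take_replicate]
    simp only [List.length_replicate, Nat.add_sub_cancel_left]
    have h1 : min (a + c) a = a := by omega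
    have h2 : min c b = c := by omega
    rw [h1, h2, List.sum_append, List.sum_replicate, List.sum_replicate]
    have hmax : (max 0 (((a + c : Nat) : Int) - a)) = (c : Int) := by push_cast; omega
    push_cast
    push_cast at hmax
    rw [hmax]
    ring

theorem equal_size_bin_spec : Claim_equal_equal_size_bin := by
  intro m n _ hn
  unfold Spec_equal_size_bin equal_size_bin equal_size_bin_alt
  simp only []
  set q := m.tdiv n with hq
  set r := PySem.Int.mod m n with hr
  rcases lt_trichotomy n 0 with hneg | hzero | hpos
  · -- n < 0 : Python % has the divisor's sign, so r ≤ 0; both sides empty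
    have hb := PySem.Int.mod_neg_bounds (a := m) (b := n) hneg
    have hr0 : ¬ r > 0 := by omega
    have hn0 : n.toNat = 0 := by omega
    rw [if_neg hr0, hn0]
    simp [PySem.List.pyRange_one_eq_nil (le_of_lt hneg)]
  · exact absurd hzero hn
  · -- n > 0 : 0 ≤ r < n
    have hr0 : 0 ≤ r := PySem.Int.mod_nonneg (a := m) hpos
    have hrn : r < n := PySem.Int.mod_lt (a := m) hpos
    rw [PySem.List.pyRange_one (a := 0) (b := n)]
    simp only [List.map_map, sub_zero]
    -- reduce both branches to the same closed form via cumLoopA_eq / take_sum_bins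
    have key : ∀ (L : List Int), L.length = n.toNat →
        (∀ k : Nat, k ≤ n.toNat → (L.take k).sum = q * k + max 0 ((k : Int) - (n - r))) →
        (match L with
         | [] => ([] : List Int)
         | x :: xs => x :: cumLoopA x xs)
          = (List.range n.toNat).map
              (fun k : Nat => q * ((0 : Int) + k + 1) + max 0 ((0 : Int) + k + 1 - (n - r))) := by
      intro L hlen hsum
      match L, hlen with
      | [], hlen =>
        show ([] : List Int) = _
        simp at hlen
        simp [← hlen]
      | x :: xs, hlen =>
        show x :: cumLoopA x xs = _
        have hx : x = q * 1 + max 0 ((1 : Int) - (n - r)) := by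
          have := hsum 1 (by omega)
          simpa using this
        rw [cumLoopA_eq]
        have hlen' : xs.length + 1 = n.toNat := by simpa using hlen
        rw [← hlen']
        rw [List.range_succ_eq_map, List.map_cons, List.map_map]
        simp only [List.cons.injEq]
        refine ⟨?_, ?_⟩
        · rw [hx]; norm_num
        · apply List.map_congr_left
          intro i hi
          have hi' : i < xs.length := List.mem_range.mp hi
          have h2 := hsum (i + 2) (by omega)
          push_cast at h2
          have h3 : (xs.take (i + 1)).sum = ((x :: xs).take (i + 2)).sum - x := by
            simp [List.take_succ_cons]
          simp only [Function.comp]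
          push_cast
          rw [h3, h2]
          have e1 : q * ((i : Int) + 2) = q * (0 + ((i : Int) + 1) + 1) := by ring
          have e2 : ((i : Int) + 2 - (n - r)) = (0 + ((i : Int) + 1) + 1 - (n - r)) := by ring
          rw [e1, e2]
          omega
    split_ifs with hrpos
    · -- bins [q]*(n-r) ++ [q+1]*r
      refine key _ ?_ ?_
      · simp; omega
      · intro k hk
        have := take_sum_bins q (n - r).toNat r.toNat k (by omega)
        rw [this]
        congr 1
        omega
    · -- r = 0 : bins [q]*n ; [q]*n = [q]*n ++ [q+1]*0
      have hr0' : r = 0 := by omega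
      refine key _ ?_ ?_
      · simp
      · intro k hk
        have := take_sum_bins q n.toNat 0 k (by omega)
        simp only [List.replicate_zero, List.append_nil] at this
        rw [this]
        congr 1
        omega
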